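-- pv_equiv track=rewrite | github.com/marloncalvo/AdventOfCode | 2015/day1.py | final_level
-- ===== SOURCE A (Python) =====
-- def final_level(s):
--     floor = 0
--     for c in s:
--         if c == '(':
--             floor = floor + 1
--         else:
--             floor = floor - 1
--
--     return floor
-- ===== SOURCE B (Python) =====
-- def final_level(s):
--     return 2 * s.count('(') - len(s)
-- ===== Notes on version B (the rewrite author's own statement) =====
-- stated objective: simpler
-- what changed: Replaces the character-by-character loop with the closed form 2*s.count('(') - len(s), since every non-'(' character contributes -1.
import Mathlib
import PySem

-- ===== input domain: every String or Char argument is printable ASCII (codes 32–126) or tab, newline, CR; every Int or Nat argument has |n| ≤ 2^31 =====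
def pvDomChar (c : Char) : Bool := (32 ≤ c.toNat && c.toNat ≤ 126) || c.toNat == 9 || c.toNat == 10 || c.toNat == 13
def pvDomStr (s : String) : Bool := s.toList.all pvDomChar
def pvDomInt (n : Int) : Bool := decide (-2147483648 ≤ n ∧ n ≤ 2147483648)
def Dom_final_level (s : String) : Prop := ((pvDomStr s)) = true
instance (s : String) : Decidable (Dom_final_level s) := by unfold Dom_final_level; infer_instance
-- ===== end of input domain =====

-- B replaces the loop with the closed form 2*s.count('(') - len(s): simpler, one expression.

-- ===== PORT A =====
def final_level (s : String) : Int :=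
  s.toList.foldl (fun floor c => if c = '(' then floor + 1 else floor - 1) 0

-- ===== PORT B =====
def final_level_alt (s : String) : Int :=
  2 * (PySem.Str.count s "(" : Int) - PySem.Str.len s

-- ===== PRECONDITION & SPEC =====
def Spec_final_level (s : String) (out : Int) : Prop := out = final_level_alt s
instance (s : String) (out : Int) : Decidable (Spec_final_level s out) := by unfold Spec_final_level; infer_instance

-- ===== CLAIM (what is proved, stated in full; the proofs are below) =====
def Claim_equal_final_level : Prop := ∀ (s : String), Dom_final_level s → Spec_final_level s (final_level s)

-- ===== LEMMAS AND PROOFS =====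

-- count.go with a single-character needle counts occurrences of that character
lemma count_go_single (c : Char) :
    ∀ (l : List Char) (fuel acc : ℕ), l.length ≤ fuel →
      PySem.Chars.count.go [c] fuel l acc = acc + l.count c := by
  intro l
  induction l with
  | nil =>
    intro fuel acc _
    cases fuel <;> simp [PySem.Chars.count.go]
  | cons h t ih =>
    intro fuel acc hf
    cases fuel with
    | zero => simp at hf
    | succ n =>
      by_cases hc : h = c
      · subst hc
        simp only [PySem.Chars.count.go, List.isPrefixOf]
        rw [if_pos (by simp)]
        simp only [List.length_singleton, List.drop_succ_cons, List.drop_zero]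
        rw [ih n (acc + 1) (by simpa using Nat.lt_succ_iff.mp (Nat.lt_of_lt_of_le (Nat.lt_succ_self _) hf))]
        simp
        omega
      · simp only [PySem.Chars.count.go, List.isPrefixOf_iff_prefix]
        rw [if_neg (by simp [List.prefix_cons_iff, Ne.symm hc])]
        rw [ih n acc (by simpa using Nat.succ_le_succ_iff.mp hf)]
        simp [hc]

lemma count_single (c : Char) (l : List Char) : PySem.Chars.count l [c] = l.count c := by
  simp only [PySem.Chars.count, List.isEmpty_cons, if_false, Bool.false_eq_true]
  rw [count_go_single c l l.length 0 le_rfl]; omega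

-- the foldl of A computes 2*count - length
lemma foldl_closed (l : List Char) :
    ∀ (k : Int),
      l.foldl (fun floor c => if c = '(' then floor + 1 else floor - 1) k
        = k + 2 * (l.count '(' : Int) - l.length := by
  induction l with
  | nil => intro k; simp
  | cons h t ih =>
    intro k
    by_cases hc : h = '('
    · subst hc
      simp only [List.foldl_cons, ih, List.count_cons, List.length_cons]
      simp
      ring
    · simp only [List.foldl_cons, if_neg hc, ih, List.count_cons, List.length_cons]
      simp [hc]
      ring

-- ===== VERDICT (by name: the statement is the Claim_ definition above) =====
theorem final_level_spec : Claim_equal_final_level := by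
  intro s _
  unfold Spec_final_level final_level final_level_alt
  rw [foldl_closed]
  simp [PySem.Str.count, PySem.Str.len, count_single]
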